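-- pv_equiv track=rewrite | github.com/refactory-lang/ai-coding-lang-bench | generated/minigit-python-mypy-20-v2/minigit.py | parse_commit
-- ===== SOURCE A (Python) =====
-- def parse_commit(content: str) -> tuple[str, str, str, list[tuple[str, str]]]:
--     """Parse commit content, return (parent, timestamp, message, files)."""
--     parent: str = ""
--     timestamp: str = ""
--     message: str = ""
--     files: list[tuple[str, str]] = []
--     in_files: bool = False
--     for line in content.splitlines():
--         if in_files:
--             parts: list[str] = line.split(" ", 1)
--             if len(parts) == 2:
--                 files.append((parts[0], parts[1]))
--         elif line.startswith("parent: "):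
--             parent = line[8:]
--         elif line.startswith("timestamp: "):
--             timestamp = line[11:]
--         elif line.startswith("message: "):
--             message = line[9:]
--         elif line == "files:":
--             in_files = True
--     return parent, timestamp, message, files
-- ===== SOURCE B (Python) =====
-- def parse_commit(content: str) -> tuple[str, str, str, list[tuple[str, str]]]:
--     """Parse commit content, return (parent, timestamp, message, files)."""
--     lines = content.splitlines()
--     # partition at the first "files:" line: header region / files region
--     if "files:" in lines:
--         i = lines.index("files:")
--         header, file_lines = lines[:i], lines[i + 1:]
--     else:
--         header, file_lines = lines, []
--     parent = timestamp = message = ""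
--     for line in header:
--         if line.startswith("parent: "):
--             parent = line[8:]
--         elif line.startswith("timestamp: "):
--             timestamp = line[11:]
--         elif line.startswith("message: "):
--             message = line[9:]
--     files = [(p[0], p[1]) for p in (l.split(" ", 1) for l in file_lines) if len(p) == 2]
--     return parent, timestamp, message, files
-- ===== Notes on version B (the rewrite author's own statement) =====
-- stated objective: alternative
-- what changed: B first partitions the lines at the first 'files:' line into a header region and a files region, then folds prefix assignments over the header and maps/filters the files region, instead of A's single loop carrying an in_files state flag.
import Mathlib
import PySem

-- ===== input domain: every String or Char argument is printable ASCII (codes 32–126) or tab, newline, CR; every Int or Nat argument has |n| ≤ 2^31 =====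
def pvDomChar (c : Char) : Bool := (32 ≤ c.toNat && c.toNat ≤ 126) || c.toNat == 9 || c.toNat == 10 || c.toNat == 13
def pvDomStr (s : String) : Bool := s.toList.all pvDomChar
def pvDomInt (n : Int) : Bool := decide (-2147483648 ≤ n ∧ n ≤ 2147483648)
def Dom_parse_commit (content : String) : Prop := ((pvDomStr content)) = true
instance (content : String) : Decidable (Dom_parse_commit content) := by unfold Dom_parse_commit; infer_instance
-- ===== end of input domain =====

-- B replaces A's single stateful loop (in_files flag) by an explicit partition of the lines
-- at the first "files:" line, a fold over the header region, and a filterMap over the files region.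

-- ===== PORT A =====
-- A's loop state: (parent, timestamp, message, files, in_files); one step per line, branches in A's order.
def pvStepA (st : String × String × String × List (String × String) × Bool) (line : String) :
    String × String × String × List (String × String) × Bool :=
  match st with
  | (parent, timestamp, message, files, in_files) =>
    if in_files then
      match PySem.Str.splitMax? line " " 1 with
      | some [a, b] => (parent, timestamp, message, files ++ [(a, b)], in_files)
      | _ => (parent, timestamp, message, files, in_files)
    else if PySem.Str.startswith line "parent: " then
      (PySem.Str.slice line (some 8) none, timestamp, message, files, in_files)
    else if PySem.Str.startswith line "timestamp: " then
      (parent, PySem.Str.slice line (some 11) none, message, files, in_files)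
    else if PySem.Str.startswith line "message: " then
      (parent, timestamp, PySem.Str.slice line (some 9) none, files, in_files)
    else if line = "files:" then
      (parent, timestamp, message, files, true)
    else (parent, timestamp, message, files, in_files)

def parse_commit (content : String) : String × String × String × (List (String × String)) :=
  match (PySem.Str.splitlines content).foldl pvStepA ("", "", "", [], false) with
  | (parent, timestamp, message, files, _) => (parent, timestamp, message, files)

-- ===== PORT B =====
-- partition at the first "files:" line: (header region, files region)
def pvPartition (lines : List String) : List String × List String :=
  match PySem.List.index? lines "files:" with
  | some i => (PySem.List.slice lines none (some (i : Int)),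
               PySem.List.slice lines (some ((i : Int) + 1)) none)
  | none => (lines, [])

-- header step: prefix assignments, same branch order as the Python
def pvStepH (acc : String × String × String) (line : String) : String × String × String :=
  if PySem.Str.startswith line "parent: " then
    (PySem.Str.slice line (some 8) none, acc.2.1, acc.2.2)
  else if PySem.Str.startswith line "timestamp: " then
    (acc.1, PySem.Str.slice line (some 11) none, acc.2.2)
  else if PySem.Str.startswith line "message: " then
    (acc.1, acc.2.1, PySem.Str.slice line (some 9) none)
  else acc

-- files-region line: line.split(" ", 1), kept only when it yields exactly two parts
def pvFSplit (line : String) : Option (String × String) :=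
  match PySem.Str.splitMax? line " " 1 with
  | some [a, b] => some (a, b)
  | _ => none

def parse_commit_alt (content : String) : String × String × String × (List (String × String)) :=
  let hf := pvPartition (PySem.Str.splitlines content)
  match hf.1.foldl pvStepH ("", "", "") with
  | (parent, timestamp, message) => (parent, timestamp, message, hf.2.filterMap pvFSplit)

-- ===== PRECONDITION & SPEC =====
def Spec_parse_commit (content : String) (out : String × String × String × (List (String × String))) : Prop := out = parse_commit_alt content
instance (content : String) (out : String × String × String × (List (String × String))) : Decidable (Spec_parse_commit content out) := by unfold Spec_parse_commit; infer_instance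

-- ===== CLAIM (what is proved, stated in full; the proofs are below) =====
def Claim_equal_parse_commit : Prop := ∀ (content : String), Dom_parse_commit content → Spec_parse_commit content (parse_commit content)

-- ===== LEMMAS AND PROOFS =====

-- once in_files is true, one A-step appends exactly pvFSplit of the line
lemma pvStepA_true (p t m : String) (fs : List (String × String)) (l : String) :
    pvStepA (p, t, m, fs, true) l = (p, t, m, fs ++ (pvFSplit l).toList, true) := by
  simp only [pvStepA, pvFSplit]
  cases h : PySem.Str.splitMax? l " " 1 with
  | none => simp
  | some parts =>
    match parts with
    | [] => simp
    | [a] => simp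
    | [a, b] => simp
    | a :: b :: c :: r => simp

lemma pvFoldA_true (ls : List String) : ∀ (p t m : String) (fs : List (String × String)),
    ls.foldl pvStepA (p, t, m, fs, true) = (p, t, m, fs ++ ls.filterMap pvFSplit, true) := by
  induction ls with
  | nil => intro p t m fs; simp
  | cons l ls ih =>
    intro p t m fs
    rw [List.foldl_cons, pvStepA_true, ih]
    cases h : pvFSplit l <;> simp [h]

-- on a non-"files:" line with in_files still false, A's step is B's header step
lemma pvStepA_header (l : String) (h : l ≠ "files:") (p t m : String) (fs : List (String × String)) :
    pvStepA (p, t, m, fs, false) l =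
      ((pvStepH (p, t, m) l).1, (pvStepH (p, t, m) l).2.1, (pvStepH (p, t, m) l).2.2, fs, false) := by
  simp only [pvStepA, pvStepH]
  split_ifs <;> simp_all

lemma pvStepA_filesLine (p t m : String) (fs : List (String × String)) :
    pvStepA (p, t, m, fs, false) "files:" = (p, t, m, fs, true) := by
  simp only [pvStepA]
  rw [if_neg (by decide), if_neg (by decide), if_neg (by decide), if_neg (by decide)]
  simp

lemma pvFoldA_no (ls : List String) (h : "files:" ∉ ls) :
    ∀ (p t m : String) (fs : List (String × String)),
    ls.foldl pvStepA (p, t, m, fs, false) =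
      ((ls.foldl pvStepH (p, t, m)).1, (ls.foldl pvStepH (p, t, m)).2.1,
       (ls.foldl pvStepH (p, t, m)).2.2, fs, false) := by
  induction ls with
  | nil => intro p t m fs; simp
  | cons l ls ih =>
    intro p t m fs
    have hl : l ≠ "files:" := fun e => h (e ▸ List.mem_cons_self ..)
    have hm : "files:" ∉ ls := fun e => h (List.mem_cons_of_mem _ e)
    simp only [List.foldl_cons, pvStepA_header l hl, ih hm]

lemma pvFoldA_yes (pre : List String) (h : "files:" ∉ pre) (suf : List String)
    (p t m : String) (fs : List (String × String)) :
    (pre ++ "files:" :: suf).foldl pvStepA (p, t, m, fs, false) =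
      ((pre.foldl pvStepH (p, t, m)).1, (pre.foldl pvStepH (p, t, m)).2.1,
       (pre.foldl pvStepH (p, t, m)).2.2, fs ++ suf.filterMap pvFSplit, true) := by
  induction pre generalizing p t m with
  | nil =>
    simp only [List.nil_append, List.foldl_cons, List.foldl_nil, pvStepA_filesLine]
    rw [pvFoldA_true]
  | cons l pre ih =>
    have hl : l ≠ "files:" := fun e => h (e ▸ List.mem_cons_self ..)
    have hm : "files:" ∉ pre := fun e => h (List.mem_cons_of_mem _ e)
    simp only [List.cons_append, List.foldl_cons, pvStepA_header l hl, ih hm]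

-- ===== VERDICT (by name: the statement is the Claim_ definition above) =====
theorem parse_commit_spec : Claim_equal_parse_commit := by
  intro content _
  unfold Spec_parse_commit parse_commit parse_commit_alt
  cases hidx : PySem.List.index? (PySem.Str.splitlines content) "files:" with
  | none =>
    have hmem : "files:" ∉ PySem.Str.splitlines content :=
      (PySem.List.index?_eq_none_iff ..).mp hidx
    have hp : pvPartition (PySem.Str.splitlines content) = (PySem.Str.splitlines content, []) := by
      unfold pvPartition; rw [hidx]
    rw [hp, pvFoldA_no _ hmem]
    rcases hH : List.foldl pvStepH ("", "", "") (PySem.Str.splitlines content) with ⟨a, b, c⟩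
    simp [hH]
  | some i =>
    obtain ⟨pre, suf, hls, hlen, hpre⟩ := (PySem.List.index?_eq_some_iff ..).mp hidx
    have h1 : PySem.List.slice (PySem.Str.splitlines content) none (some (i : Int)) = pre := by
      rw [hls, PySem.List.slice_to _ (Int.natCast_nonneg i)]
      simpa using List.take_left' (l₂ := "files:" :: suf) (by omega)
    have h2 : PySem.List.slice (PySem.Str.splitlines content) (some ((i : Int) + 1)) none = suf := by
      rw [hls, PySem.List.slice_from _ (by positivity)]
      have he : pre ++ "files:" :: suf = (pre ++ ["files:"]) ++ suf := by simp
      have ht : ((i : Int) + 1).toNat = (pre ++ ["files:"]).length := by simp; omega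
      rw [he, ht, List.drop_left']
      simp
    have hp : pvPartition (PySem.Str.splitlines content) = (pre, suf) := by
      unfold pvPartition; rw [hidx]
      exact Prod.ext h1 h2
    rw [hp, hls, pvFoldA_yes pre hpre suf]
    rcases hH : List.foldl pvStepH ("", "", "") pre with ⟨a, b, c⟩
    simp [hH]
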